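-- pv_equiv track=rewrite | github.com/OWalker02/Top-Drives | src/scraping/_scraping_helpers.py | _split_into_groups
-- ===== SOURCE A (Python) =====
-- def _split_into_groups(car_count: int) -> list[tuple[int, int]]:
--     """
--     Splits car_count into groups of 7, using 8 where needed to avoid remainders.
--     Falls back to variable-size final group if unsolvable.
--     """
--     groups = []
--     if car_count % 7 == 0:
--         for i in range(0, car_count, 7):
--             groups.append((i, i + 7))
--     else:
--         solved = False
--         max_eights = car_count // 8  # Check the max number of groups size 8
--         # Check all combos of groups of size 7 and 8
--         for num_add_one in range(1, max_eights + 1):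
--             # If using this combo works, make it
--             if (car_count - num_add_one * 8) % 7 == 0:
--                 for i in range(0, car_count - num_add_one * 8, 7):
--                     groups.append((i, i + 7))
--                 for j in range(car_count - num_add_one * 8, car_count, 8):
--                     groups.append((j, j + 8))
--                 solved = True
--                 break
--         if not solved:
--             for i in range(0, car_count, 7):
--                 groups.append((i, min(i + 7, car_count)))
--     return groups
-- ===== SOURCE B (Python) =====
-- def _split_into_groups(car_count: int) -> list[tuple[int, int]]:
--     """Splits car_count into groups of 7, using 8 where needed to avoid remainders.
--
--     Closed form: since 8 ≡ 1 (mod 7), the smallest number of size-8 groups that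
--     makes the rest divisible by 7 is exactly r = car_count % 7.
--     """
--     r = car_count % 7
--     if r == 0:
--         return [(i, i + 7) for i in range(0, car_count, 7)]
--     if r <= car_count // 8:
--         split = car_count - 8 * r
--         return ([(i, i + 7) for i in range(0, split, 7)]
--                 + [(j, j + 8) for j in range(split, car_count, 8)])
--     return [(i, min(i + 7, car_count)) for i in range(0, car_count, 7)]
-- ===== Notes on version B (the rewrite author's own statement) =====
-- stated objective: simpler
-- what changed: Replaces A's linear search with break over candidate counts of size-8 groups by the closed-form remainder car_count mod seven (valid since eight is one mod seven), and builds the groups with comprehensions instead of append-in-loop accumulation.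
import Mathlib
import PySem

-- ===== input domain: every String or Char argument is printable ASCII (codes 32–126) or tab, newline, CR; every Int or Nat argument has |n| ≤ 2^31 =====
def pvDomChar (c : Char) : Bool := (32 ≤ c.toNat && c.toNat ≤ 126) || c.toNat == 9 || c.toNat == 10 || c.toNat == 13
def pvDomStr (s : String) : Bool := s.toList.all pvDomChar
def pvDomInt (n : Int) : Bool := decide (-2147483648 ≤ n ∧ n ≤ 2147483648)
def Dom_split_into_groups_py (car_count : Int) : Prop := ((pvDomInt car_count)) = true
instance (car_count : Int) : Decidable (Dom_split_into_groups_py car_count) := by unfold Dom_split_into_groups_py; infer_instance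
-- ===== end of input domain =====

-- B replaces A's linear search for the number of size-8 groups by the closed form
-- r = car_count % 7 (since 8 ≡ 1 mod 7) and builds the groups with comprehensions.

-- ===== PORT A =====
-- A's inner search loop 'for num_add_one in range(1, max_eights+1): … break' :
-- returns the first k in the list with (car_count - k*8) % 7 == 0.
def aSearch (car_count : Int) : List Int → Option Int
  | [] => none
  | k :: rest =>
      if PySem.Int.mod (car_count - k * 8) 7 = 0 then some k
      else aSearch car_count rest

def split_into_groups_py (car_count : Int) : List (Int × Int) :=
  if PySem.Int.mod car_count 7 = 0 then
    (PySem.List.pyRange 0 car_count 7).foldl (fun g i => g ++ [(i, i + 7)]) []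
  else
    -- max_eights = car_count // 8
    match aSearch car_count
        (PySem.List.pyRange 1 (PySem.Int.floordiv car_count 8 + 1) 1) with
    | some k =>
        (PySem.List.pyRange (car_count - k * 8) car_count 8).foldl
          (fun g j => g ++ [(j, j + 8)])
          ((PySem.List.pyRange 0 (car_count - k * 8) 7).foldl
            (fun g i => g ++ [(i, i + 7)]) [])
    | none =>
        (PySem.List.pyRange 0 car_count 7).foldl
          (fun g i => g ++ [(i, min (i + 7) car_count)]) []

-- ===== PORT B =====
def split_into_groups_py_alt (car_count : Int) : List (Int × Int) :=
  -- r = car_count % 7; split = car_count - 8 * r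
  if PySem.Int.mod car_count 7 = 0 then
    (PySem.List.pyRange 0 car_count 7).map (fun i => (i, i + 7))
  else if PySem.Int.mod car_count 7 ≤ PySem.Int.floordiv car_count 8 then
    (PySem.List.pyRange 0 (car_count - 8 * PySem.Int.mod car_count 7) 7).map
        (fun i => (i, i + 7))
      ++ (PySem.List.pyRange (car_count - 8 * PySem.Int.mod car_count 7) car_count 8).map
        (fun j => (j, j + 8))
  else
    (PySem.List.pyRange 0 car_count 7).map (fun i => (i, min (i + 7) car_count))

-- ===== PRECONDITION & SPEC =====
def Spec_split_into_groups_py (car_count : Int) (out : List (Int × Int)) : Prop := out = split_into_groups_py_alt car_count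
instance (car_count : Int) (out : List (Int × Int)) : Decidable (Spec_split_into_groups_py car_count out) := by unfold Spec_split_into_groups_py; infer_instance

-- ===== CLAIM (what is proved, stated in full; the proofs are below) =====
def Claim_equal_split_into_groups_py : Prop := ∀ (car_count : Int), Dom_split_into_groups_py car_count → Spec_split_into_groups_py car_count (split_into_groups_py car_count)

-- ===== LEMMAS AND PROOFS =====

-- append-accumulator foldl builds a map
theorem foldl_app {α β : Type} (f : α → β) (l : List α) (acc : List β) :
    l.foldl (fun g i => g ++ [f i]) acc = acc ++ l.map f := by
  induction l generalizing acc with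
  | nil => simp
  | cons x xs ih => simp [List.foldl, ih]

-- the first k ∈ [a, b) with (c - 8k) ≡ 0 (mod 7) is c % 7, provided 0 < a ≤ c % 7 < 7
theorem aSearch_eq (c : Int) (n : Nat) : ∀ a b : Int, (b - a).toNat = n →
    0 < a → a ≤ (c % 7) → (c % 7) < 7 →
    aSearch c (PySem.List.pyRange a b 1) =
      (if (c % 7) < b then some ((c % 7)) else none) := by
  induction n with
  | zero =>
      intro a b hn ha har hr7
      have hempty : PySem.List.pyRange a b 1 = [] := by
        rw [PySem.List.pyRange_one]
        have : (b - a).toNat = 0 := hn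
        simp [this]
      rw [hempty, if_neg (by omega)]
      rfl
  | succ m ih =>
      intro a b hn ha har hr7
      have hab : a < b := by omega
      rw [PySem.List.pyRange_one_cons hab]
      have hmod : PySem.Int.mod (c - a * 8) 7 = (c - a * 8) % 7 :=
        PySem.Int.mod_eq_emod_of_pos (by norm_num)
      by_cases hcase : a = (c % 7)
      · have hz : PySem.Int.mod (c - a * 8) 7 = 0 := by rw [hmod]; omega
        rw [show aSearch c (a :: PySem.List.pyRange (a+1) b) = some a by
          simp only [aSearch]; rw [if_pos hz], hcase, if_pos (by omega)]
      · have hne : ¬ PySem.Int.mod (c - a * 8) 7 = 0 := by rw [hmod]; omega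
        rw [show aSearch c (a :: PySem.List.pyRange (a+1) b) =
          aSearch c (PySem.List.pyRange (a+1) b) by simp only [aSearch]; rw [if_neg hne]]
        exact ih (a + 1) b (by omega) (by omega) (by omega) hr7

theorem split_eq (c : Int) :
    split_into_groups_py c = split_into_groups_py_alt c := by
  have hmod : PySem.Int.mod c 7 = c % 7 :=
    PySem.Int.mod_eq_emod_of_pos (by norm_num)
  unfold split_into_groups_py split_into_groups_py_alt
  rw [hmod]
  by_cases h0 : c % 7 = 0
  · rw [if_pos h0, if_pos h0, foldl_app]
    simp
  · have hr1 : 1 ≤ c % 7 := by omega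
    have hr7 : c % 7 < 7 := by omega
    rw [if_neg h0, if_neg h0]
    rw [aSearch_eq c (PySem.Int.floordiv c 8 + 1 - 1).toNat 1
      (PySem.Int.floordiv c 8 + 1) rfl (by norm_num) hr1 hr7]
    by_cases hle : c % 7 ≤ PySem.Int.floordiv c 8
    · rw [if_pos (by omega), if_pos hle]
      dsimp only
      rw [foldl_app, foldl_app, List.nil_append, mul_comm (c % 7) 8]
    · rw [if_neg (by omega), if_neg hle]
      dsimp only
      rw [foldl_app]
      simp

-- ===== VERDICT (by name: the statement is the Claim_ definition above) =====
theorem split_into_groups_py_spec : Claim_equal_split_into_groups_py := by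
  intro c _
  exact split_eq c
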